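-- pv_equiv track=rewrite | github.com/abeel50/LeetCode_2 | 2255-count-prefixes-of-a-given-string/2255-count-prefixes-of-a-given-string.py | countPrefixes
-- ===== SOURCE A (Python) =====
-- from typing import List
--
-- def countPrefixes(words: List[str], s: str) -> int:
--   def isPrefix(w1, w2):
--     for i, c in enumerate(w1):
--       if i >= len(w2) or w2[i] != c:
--         return False
--
--     return True
--
--   res = 0
--   for w in words:
--     if isPrefix(w, s):
--       res += 1
--   return res
-- ===== SOURCE B (Python) =====
-- from typing import List
--
-- def countPrefixes(words: List[str], s: str) -> int:
--     cnt = {}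
--     for w in words:
--         cnt[w] = cnt.get(w, 0) + 1
--     return sum(c for w, c in cnt.items() if s.startswith(w))
-- ===== Notes on version B (the rewrite author's own statement) =====
-- stated objective: alternative
-- what changed: Replaces A's per-word character-by-character scan with a multiplicity dictionary built once over words and a weighted sum of s.startswith over the distinct words only.
import Mathlib
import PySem

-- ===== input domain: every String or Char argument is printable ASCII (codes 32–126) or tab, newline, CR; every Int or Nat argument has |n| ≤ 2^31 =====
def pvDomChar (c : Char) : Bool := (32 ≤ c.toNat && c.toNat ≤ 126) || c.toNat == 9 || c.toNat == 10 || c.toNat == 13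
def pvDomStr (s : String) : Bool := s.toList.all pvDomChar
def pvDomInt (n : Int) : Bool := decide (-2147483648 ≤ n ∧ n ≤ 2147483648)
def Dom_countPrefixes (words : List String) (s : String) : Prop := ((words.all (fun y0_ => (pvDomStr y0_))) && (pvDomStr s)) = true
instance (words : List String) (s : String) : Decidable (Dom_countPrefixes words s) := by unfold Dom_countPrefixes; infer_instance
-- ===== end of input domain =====

-- B replaces A's per-word character scan with a multiplicity dictionary over words and a
-- weighted startswith-sum over the distinct words (alternative decomposition, same result).


-- ===== PORT A =====
-- isPrefix(w1, w2): 'for i, c in enumerate(w1): if i >= len(w2) or w2[i] != c: return False; return True'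
def pvIsPrefix (w2 : List Char) : Nat → List Char → Bool
  | _, [] => true
  | i, c :: cs =>
      if w2.length ≤ i then false
      else if w2.getD i c ≠ c then false
      else pvIsPrefix w2 (i + 1) cs

def countPrefixes (words : List String) (s : String) : Int :=
  words.foldl (fun res w => if pvIsPrefix s.toList 0 w.toList then res + 1 else res) 0

-- ===== PORT B =====
-- cnt = {}; for w in words: cnt[w] = cnt.get(w, 0) + 1
-- return sum(c for w, c in cnt.items() if s.startswith(w))
def countPrefixes_alt (words : List String) (s : String) : Int :=
  let cnt : PySem.Dict String Int :=
    words.foldl (fun d w => d.insert w (d.getD w 0 + 1)) PySem.Dict.empty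
  (cnt.items.map (fun p => if PySem.Str.startswith s p.1 then p.2 else 0)).sum

-- ===== PRECONDITION & SPEC =====
def Spec_countPrefixes (words : List String) (s : String) (out : Int) : Prop := out = countPrefixes_alt words s
instance (words : List String) (s : String) (out : Int) : Decidable (Spec_countPrefixes words s out) := by unfold Spec_countPrefixes; infer_instance

-- ===== CLAIM (what is proved, stated in full; the proofs are below) =====
def Claim_equal_countPrefixes : Prop := ∀ (words : List String) (s : String), Dom_countPrefixes words s → Spec_countPrefixes words s (countPrefixes words s)

-- ===== LEMMAS AND PROOFS =====

-- A's scan decides the prefix relation on the suffix of w2 starting at i.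
theorem pvIsPrefix_eq_prefix (w2 : List Char) (cs : List Char) (i : Nat) :
    pvIsPrefix w2 i cs = true ↔ cs <+: w2.drop i := by
  induction cs generalizing i with
  | nil => simp [pvIsPrefix]
  | cons c cs ih =>
    by_cases h : w2.length ≤ i
    · simp [pvIsPrefix, h, List.drop_eq_nil_of_le h]
    · have hlt : i < w2.length := Nat.lt_of_not_le h
      have hget : w2.getD i c = w2[i] := List.getD_eq_getElem w2 c hlt
      have hd : w2.drop i = w2[i] :: w2.drop (i + 1) := List.drop_eq_getElem_cons hlt
      rw [show pvIsPrefix w2 i (c :: cs)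
            = (if w2.length ≤ i then false
               else if w2.getD i c ≠ c then false else pvIsPrefix w2 (i + 1) cs) from rfl,
          if_neg h, hget, hd, List.cons_prefix_cons]
      by_cases hw : w2[i] = c
      · simp [hw, ih]
      · simp [hw, Ne.symm hw]

-- A weighted count-sum over the distinct elements equals the 0/1 sum over the list.
theorem sum_ofList_count (p : String → Bool) (l : List String) :
    ((PySem.Set.ofList l).map (fun k => if p k then (l.count k : Int) else 0)).sum
      = (l.map (fun w => if p w then (1 : Int) else 0)).sum := by
  rw [PySem.List.sum_map_ite_one_zero, ← List.sum_toFinset _ (PySem.Set.nodup_ofList l)]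
  have hset : (PySem.Set.ofList l).toFinset = l.toFinset := by
    ext a; simp [PySem.Set.mem_ofList]
  rw [hset]
  calc ∑ a ∈ l.toFinset, (if p a then (l.count a : Int) else 0)
      = ∑ a ∈ l.toFinset, ((l.filter p).count a : Int) := by
        refine Finset.sum_congr rfl (fun a _ => ?_)
        by_cases hp : p a = true
        · rw [if_pos hp, List.count_filter hp]
        · rw [if_neg hp]
          have : a ∉ l.filter p := fun hmem => hp (List.of_mem_filter hmem)
          simp [List.count_eq_zero.mpr this]
    _ = ∑ a ∈ (l.filter p).toFinset, ((l.filter p).count a : Int) := by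
        refine (Finset.sum_subset ?_ ?_).symm
        · intro a ha
          simp only [List.mem_toFinset] at ha ⊢
          exact List.mem_of_mem_filter ha
        · intro a _ ha
          simp only [List.mem_toFinset] at ha
          simp [List.count_eq_zero.mpr ha]
    _ = ((l.countP p : Nat) : Int) := by
        rw [List.countP_eq_length_filter]
        exact_mod_cast congrArg (Nat.cast (R := Int))
          (List.sum_toFinset_count_eq_length (l.filter p))

-- ===== VERDICT (by name: the statement is the Claim_ definition above) =====
theorem countPrefixes_spec : Claim_equal_countPrefixes := by
  intro words s _
  show countPrefixes words s = countPrefixes_alt words s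
  simp only [countPrefixes, countPrefixes_alt]
  have hpt : ∀ w : String,
      pvIsPrefix s.toList 0 w.toList = PySem.Str.startswith s w := by
    intro w
    apply Bool.coe_iff_coe.mp
    rw [pvIsPrefix_eq_prefix, List.drop_zero, PySem.Str.startswith_eq,
      PySem.Chars.startswith_iff]
  have hA : words.foldl (fun res w => if pvIsPrefix s.toList 0 w.toList then res + 1 else res) 0
      = (words.map (fun w => if pvIsPrefix s.toList 0 w.toList then (1 : Int) else 0)).sum := by
    have aux : ∀ (l : List String) (r : Int),
        l.foldl (fun res w => if pvIsPrefix s.toList 0 w.toList then res + 1 else res) r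
          = r + (l.map (fun w => if pvIsPrefix s.toList 0 w.toList then (1 : Int) else 0)).sum := by
      intro l
      induction l with
      | nil => simp
      | cons w ws ih =>
        intro r
        simp only [List.foldl_cons, List.map_cons, List.sum_cons]
        by_cases h : pvIsPrefix s.toList 0 w.toList = true
        · simp [h, ih]; ring
        · simp [h, ih]
    simpa using aux words 0
  rw [hA, PySem.Dict.foldl_insert_getD_add_one_eq_counter, PySem.Dict.items_counter,
    List.map_map]
  simp only [hpt]
  exact (sum_ofList_count (fun w => PySem.Str.startswith s w) words).symm
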